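-- pv_equiv track=rewrite | github.com/jixunmoe/aoc-2024 | aoc-2024/day-22/solve.py | derive_secret_at
-- ===== SOURCE A (Python) =====
-- def derive_secret(secret: int):
--     secret = (secret ^ (secret << 6)) & 0xFF_FFFF
--     secret = (secret ^ (secret >> 5)) & 0xFF_FFFF
--     secret = (secret ^ (secret << 11)) & 0xFF_FFFF
--     return secret
--
-- def derive_secret_at(seed: int, n: int) -> tuple[int, dict[int, int]]:
--     deltas = {}
--     secret = seed
--     secret_d = seed % 10
--
--     delta_history = 0
--
--     for i in range(n):
--         next_secret = derive_secret(secret)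
--         next_secret_d = next_secret % 10
--
--         delta_history = ((delta_history << 8) | ((next_secret_d - secret_d) % 256)) & 0xffff_ffff
--
--         if i >= 3:
--             if delta_history not in deltas:
--                 deltas[delta_history] = next_secret_d
--         secret = next_secret
--         secret_d = next_secret_d
--
--     return secret, deltas
-- ===== SOURCE B (Python) =====
-- def derive_secret(secret):
--     secret = (secret ^ (secret << 6)) & 0xFF_FFFF
--     secret = (secret ^ (secret >> 5)) & 0xFF_FFFF
--     secret = (secret ^ (secret << 11)) & 0xFF_FFFF
--     return secret
--
--
-- def derive_secret_at(seed, n):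
--     # Pass 1: simulate all steps, recording every price (secret % 10).
--     secret = seed
--     prices = [seed % 10]
--     for _ in range(n):
--         secret = derive_secret(secret)
--         prices.append(secret % 10)
--     # Pass 2: consecutive price deltas, each reduced mod 256.
--     ds = [(prices[j + 1] - prices[j]) % 256 for j in range(len(prices) - 1)]
--     # Pass 3: slide a length-4 window over the deltas; pack it into one key,
--     # record the price at the window's end on first sight.
--     deltas = {}
--     for i in range(3, len(ds)):
--         key = (ds[i - 3] << 24) | (ds[i - 2] << 16) | (ds[i - 1] << 8) | ds[i]
--         if key not in deltas:
--             deltas[key] = prices[i + 1]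
--     return secret, deltas
-- ===== Notes on version B (the rewrite author's own statement) =====
-- stated objective: alternative
-- what changed: Replaces A's single loop with rolling state (running delta_history register updated by shift-or-mask each iteration) by three separate passes: simulate all prices into an array, derive the delta array, then slide a length-4 window over the deltas building each packed key directly from the four array entries.
import Mathlib
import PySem

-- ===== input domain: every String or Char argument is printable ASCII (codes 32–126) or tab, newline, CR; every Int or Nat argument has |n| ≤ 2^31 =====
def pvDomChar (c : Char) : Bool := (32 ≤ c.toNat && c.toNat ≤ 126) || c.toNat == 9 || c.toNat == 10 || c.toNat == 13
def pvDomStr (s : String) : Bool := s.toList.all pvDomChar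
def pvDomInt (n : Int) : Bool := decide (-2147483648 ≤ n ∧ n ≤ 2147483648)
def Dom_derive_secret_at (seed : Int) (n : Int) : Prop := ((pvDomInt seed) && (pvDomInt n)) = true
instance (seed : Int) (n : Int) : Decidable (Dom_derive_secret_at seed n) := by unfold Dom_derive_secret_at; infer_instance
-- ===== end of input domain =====

-- B replaces A's single rolling-register loop by three passes (simulate prices, take deltas, slide a packed 4-window); equal results proved.


-- ===== PORT A =====
def pvDeriveA (secret : Int) : Int :=
  let s1 := PySem.Int.band (PySem.Int.bxor secret (secret <<< (6:Nat))) 0xFFFFFF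
  let s2 := PySem.Int.band (PySem.Int.bxor s1 (s1 >>> (5:Nat))) 0xFFFFFF
  PySem.Int.band (PySem.Int.bxor s2 (s2 <<< (11:Nat))) 0xFFFFFF

def derive_secret_at (seed : Int) (n : Int) : Int × (List (Int × Int)) :=
  let st := (PySem.List.pyRange 0 n 1).foldl
    (fun (st : PySem.Dict Int Int × Int × Int × Int) (i : Int) =>
      let (deltas, secret, secret_d, delta_history) := st
      let next_secret := pvDeriveA secret
      let next_secret_d := PySem.Int.mod next_secret 10
      let dh := PySem.Int.band
        (PySem.Int.bor (delta_history <<< (8:Nat)) (PySem.Int.mod (next_secret_d - secret_d) 256))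
        0xffffffff
      let deltas' :=
        if 3 ≤ i then (if deltas.contains dh then deltas else deltas.insert dh next_secret_d)
        else deltas
      (deltas', next_secret, next_secret_d, dh))
    (PySem.Dict.empty, seed, PySem.Int.mod seed 10, 0)
  (st.2.1, st.1.items)

-- ===== PORT B =====
def pvDeriveB (secret : Int) : Int :=
  let s1 := PySem.Int.band (PySem.Int.bxor secret (secret <<< (6:Nat))) 0xFFFFFF
  let s2 := PySem.Int.band (PySem.Int.bxor s1 (s1 >>> (5:Nat))) 0xFFFFFF
  PySem.Int.band (PySem.Int.bxor s2 (s2 <<< (11:Nat))) 0xFFFFFF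

def derive_secret_at_alt (seed : Int) (n : Int) : Int × (List (Int × Int)) :=
  -- pass 1: simulate, recording every price
  let p := (PySem.List.pyRange 0 n 1).foldl
    (fun (st : Int × List Int) _ =>
      let s' := pvDeriveB st.1
      (s', st.2 ++ [PySem.Int.mod s' 10]))
    (seed, [PySem.Int.mod seed 10])
  let secret := p.1
  let prices := p.2
  -- pass 2: consecutive deltas mod 256
  let ds := (PySem.List.pyRange 0 (PySem.List.len prices - 1) 1).map
    (fun j => PySem.Int.mod (PySem.List.pyGetD prices (j+1) 0 - PySem.List.pyGetD prices j 0) 256)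
  -- pass 3: slide a length-4 window, packing the key from the arrays
  let deltas := (PySem.List.pyRange 3 (PySem.List.len ds) 1).foldl
    (fun (d : PySem.Dict Int Int) (i : Int) =>
      let key := PySem.Int.bor (PySem.Int.bor (PySem.Int.bor
        ((PySem.List.pyGetD ds (i-3) 0) <<< (24:Nat))
        ((PySem.List.pyGetD ds (i-2) 0) <<< (16:Nat)))
        ((PySem.List.pyGetD ds (i-1) 0) <<< (8:Nat)))
        (PySem.List.pyGetD ds i 0)
      if d.contains key then d else d.insert key (PySem.List.pyGetD prices (i+1) 0))
    PySem.Dict.empty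
  (secret, deltas.items)

-- ===== PRECONDITION & SPEC =====
def Spec_derive_secret_at (seed : Int) (n : Int) (out : Int × (List (Int × Int))) : Prop := out = derive_secret_at_alt seed n
instance (seed : Int) (n : Int) (out : Int × (List (Int × Int))) : Decidable (Spec_derive_secret_at seed n out) := by unfold Spec_derive_secret_at; infer_instance

-- ===== CLAIM (what is proved, stated in full; the proofs are below) =====
def Claim_equal_derive_secret_at : Prop := ∀ (seed : Int) (n : Int), Dom_derive_secret_at seed n → Spec_derive_secret_at seed n (derive_secret_at seed n)

-- ===== LEMMAS AND PROOFS =====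

-- the secret after k steps
def pvSq (s : Int) : Nat → Int
  | 0 => s
  | k+1 => pvDeriveA (pvSq s k)

-- the price after k steps
def pvPr (s : Int) (k : Nat) : Int := PySem.Int.mod (pvSq s k) 10

-- the k-th delta (Python % 256)
def pvDl (s : Int) (k : Nat) : Int := PySem.Int.mod (pvPr s (k+1) - pvPr s k) 256

-- the packed window key recorded at iteration i (meaningful for 3 ≤ i)
def pvPk (s : Int) (i : Nat) : Int :=
  pvDl s (i-3) * 16777216 + pvDl s (i-2) * 65536 + pvDl s (i-1) * 256 + pvDl s i

def pvIns (d : PySem.Dict Int Int) (k v : Int) : PySem.Dict Int Int :=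
  if d.contains k then d else d.insert k v

-- the dict after the first m iterations
def pvDct (s : Int) : Nat → PySem.Dict Int Int
  | 0 => PySem.Dict.empty
  | m+1 => if 3 ≤ m then pvIns (pvDct s m) (pvPk s m) (pvPr s (m+1)) else pvDct s m

-- A's rolling register after k iterations
def pvHst (s : Int) : Nat → Int
  | 0 => 0
  | k+1 => PySem.Int.band (PySem.Int.bor (pvHst s k <<< (8:Nat)) (pvDl s k)) 0xffffffff

-- all deltas packed (unmasked)
def pvP (s : Int) : Nat → Int
  | 0 => 0
  | k+1 => pvP s k * 256 + pvDl s k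

lemma pvDl_bounds (s : Int) (k : Nat) : 0 ≤ pvDl s k ∧ pvDl s k < 256 :=
  ⟨PySem.Int.mod_nonneg _ (by norm_num), PySem.Int.mod_lt _ (by norm_num)⟩

lemma pvOrAdd : ∀ (k a b : Nat), b < 2^k → (2^k * a) ||| b = 2^k * a + b := by
  intro k
  induction k with
  | zero => intro a b hb; interval_cases b <;> simp
  | succ k ih =>
    intro a b hb
    have e1 : Nat.bit (b.testBit 0) (b >>> 1) = b := Nat.bit_testBit_zero_shiftRight_one b
    have e2 : Nat.bit false (2^k * a) = 2^(k+1) * a := by simp [Nat.bit_val]; ring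
    have hb2 : b >>> 1 < 2^k := by simp [Nat.shiftRight_one]; omega
    have hstep := Nat.lor_bit false (2^k * a) (b.testBit 0) (b >>> 1)
    rw [← e1, ← e2, hstep, ih a _ hb2]
    rcases Bool.eq_false_or_eq_true (b.testBit 0) with h | h <;>
      simp [h, Nat.bit_val, Nat.shiftRight_one] at * <;> omega

-- the shift-or-mask step as arithmetic
lemma pvRollStep (h d : Int) (hh : 0 ≤ h) (hd0 : 0 ≤ d) (hd : d < 256) :
    PySem.Int.band (PySem.Int.bor (h <<< (8:Nat)) d) 0xffffffff = (h * 256 + d) % 4294967296 := by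
  obtain ⟨a, rfl⟩ : ∃ a : Nat, h = (a : Int) := ⟨h.toNat, (Int.toNat_of_nonneg hh).symm⟩
  obtain ⟨b, rfl⟩ : ∃ b : Nat, d = (b : Int) := ⟨d.toNat, (Int.toNat_of_nonneg hd0).symm⟩
  have hb : b < 256 := by exact_mod_cast hd
  have hmask : (0xffffffff : Int) = ((0xffffffff : Nat) : Int) := by norm_num
  rw [← Int.natCast_shiftLeft, PySem.Int.bor_natCast, hmask, PySem.Int.band_natCast]
  have hnat : ((a <<< 8) ||| b) &&& 0xffffffff = (2^8 * a + b) % 2^32 := by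
    rw [Nat.shiftLeft_eq, Nat.mul_comm a (2^8), pvOrAdd 8 a b hb]
    have := Nat.and_two_pow_sub_one_eq_mod (2^8*a + b) 32
    omega
  rw [hnat]
  push_cast
  ring_nf

lemma pvHst_eq (s : Int) (k : Nat) : pvHst s k = pvP s k % 4294967296 := by
  induction k with
  | zero => simp [pvHst, pvP]
  | succ k ih =>
    have hd := pvDl_bounds s k
    have hh : (0:Int) ≤ pvP s k % 4294967296 := Int.emod_nonneg _ (by norm_num)
    show PySem.Int.band (PySem.Int.bor (pvHst s k <<< (8:Nat)) (pvDl s k)) 0xffffffff = _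
    rw [ih, pvRollStep _ _ hh hd.1 hd.2]
    have : pvP s (k+1) = pvP s k * 256 + pvDl s k := rfl
    rw [this]
    omega

lemma pvHst_pk (s : Int) (m : Nat) (hm : 3 ≤ m) : pvHst s (m+1) = pvPk s m := by
  obtain ⟨j, rfl⟩ : ∃ j, m = j + 3 := ⟨m - 3, by omega⟩
  rw [pvHst_eq]
  have hP : pvP s (j+3+1) = pvP s j * 4294967296 +
      (pvDl s j * 16777216 + pvDl s (j+1) * 65536 + pvDl s (j+2) * 256 + pvDl s (j+3)) := by
    show (((pvP s j * 256 + pvDl s j) * 256 + pvDl s (j+1)) * 256 + pvDl s (j+2)) * 256 + pvDl s (j+3) = _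
    ring
  have hpk : pvPk s (j+3) = pvDl s j * 16777216 + pvDl s (j+1) * 65536 + pvDl s (j+2) * 256 + pvDl s (j+3) := by
    unfold pvPk
    rw [show j+3-3 = j from by omega, show j+3-2 = j+1 from by omega, show j+3-1 = j+2 from by omega]
  have b0 := pvDl_bounds s j
  have b1 := pvDl_bounds s (j+1)
  have b2 := pvDl_bounds s (j+2)
  have b3 := pvDl_bounds s (j+3)
  rw [hP, hpk]
  omega

lemma pvNatKey (a b c d : Nat) (h1 : b < 256) (h2 : c < 256) (h3 : d < 256) :
    ((a <<< 24 ||| b <<< 16) ||| c <<< 8) ||| d = a*16777216 + b*65536 + c*256 + d := by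
  simp only [Nat.shiftLeft_eq]
  have e1 : a * 2^24 ||| b * 2^16 = 2^24 * a + b * 2^16 := by
    rw [Nat.mul_comm a (2^24)]; exact pvOrAdd 24 a _ (by omega)
  have e2 : (2^24 * a + b * 2^16) ||| c * 2^8 = 2^24 * a + b * 2^16 + c * 2^8 := by
    have : 2^24 * a + b * 2^16 = 2^16 * (2^8 * a + b) := by ring
    rw [this, pvOrAdd 16 _ _ (by omega)]
  have e3 : (2^24 * a + b * 2^16 + c * 2^8) ||| d = 2^24 * a + b * 2^16 + c * 2^8 + d := by
    have : 2^24 * a + b * 2^16 + c * 2^8 = 2^8 * (2^16 * a + 2^8 * b + c) := by ring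
    rw [this, pvOrAdd 8 _ _ (by omega)]
  rw [e1, e2, e3]; ring

-- B's packed key as arithmetic
lemma pvKey (d0 d1 d2 d3 : Int) (h0 : 0 ≤ d0) (h1 : 0 ≤ d1 ∧ d1 < 256)
    (h2 : 0 ≤ d2 ∧ d2 < 256) (h3 : 0 ≤ d3 ∧ d3 < 256) :
    PySem.Int.bor (PySem.Int.bor (PySem.Int.bor (d0 <<< (24:Nat)) (d1 <<< (16:Nat))) (d2 <<< (8:Nat))) d3
      = d0 * 16777216 + d1 * 65536 + d2 * 256 + d3 := by
  obtain ⟨a, rfl⟩ : ∃ a : Nat, d0 = (a : Int) := ⟨d0.toNat, (Int.toNat_of_nonneg h0).symm⟩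
  obtain ⟨b, rfl⟩ : ∃ b : Nat, d1 = (b : Int) := ⟨d1.toNat, (Int.toNat_of_nonneg h1.1).symm⟩
  obtain ⟨c, rfl⟩ : ∃ c : Nat, d2 = (c : Int) := ⟨d2.toNat, (Int.toNat_of_nonneg h2.1).symm⟩
  obtain ⟨d, rfl⟩ : ∃ d : Nat, d3 = (d : Int) := ⟨d3.toNat, (Int.toNat_of_nonneg h3.1).symm⟩
  simp only [← Int.natCast_shiftLeft, PySem.Int.bor_natCast]
  rw [pvNatKey a b c d (by exact_mod_cast h1.2) (by exact_mod_cast h2.2) (by exact_mod_cast h3.2)]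
  push_cast
  ring

lemma pvFoldA (s : Int) (m : Nat) :
    (PySem.List.pyRange 0 (m:Int) 1).foldl
      (fun (st : PySem.Dict Int Int × Int × Int × Int) (i : Int) =>
        let (deltas, secret, secret_d, delta_history) := st
        let next_secret := pvDeriveA secret
        let next_secret_d := PySem.Int.mod next_secret 10
        let dh := PySem.Int.band
          (PySem.Int.bor (delta_history <<< (8:Nat)) (PySem.Int.mod (next_secret_d - secret_d) 256))
          0xffffffff
        let deltas' :=
          if 3 ≤ i then (if deltas.contains dh then deltas else deltas.insert dh next_secret_d)
          else deltas
        (deltas', next_secret, next_secret_d, dh))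
      (PySem.Dict.empty, s, PySem.Int.mod s 10, 0)
    = (pvDct s m, pvSq s m, pvPr s m, pvHst s m) := by
  induction m with
  | zero =>
    rw [show ((0:Nat):Int) = 0 from rfl, PySem.List.pyRange_one_eq_nil le_rfl]
    rfl
  | succ m ih =>
    rw [show ((m+1:Nat):Int) = (m:Int) + 1 from by push_cast; ring,
        PySem.List.pyRange_one_succ_right (Int.natCast_nonneg m), List.foldl_append, ih]
    simp only [List.foldl_cons, List.foldl_nil]
    have hdh : PySem.Int.band
        (PySem.Int.bor (pvHst s m <<< (8:Nat))
          (PySem.Int.mod (PySem.Int.mod (pvDeriveA (pvSq s m)) 10 - pvPr s m) 256)) 0xffffffff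
        = pvHst s (m+1) := rfl
    by_cases hm3 : 3 ≤ m
    · have hci : (3:Int) ≤ (m:Int) := by exact_mod_cast hm3
      simp only [hdh, if_pos hci]
      rw [pvHst_pk s m hm3]
      rw [show pvDct s (m+1) = pvIns (pvDct s m) (pvPk s m) (pvPr s (m+1)) from by simp [pvDct, hm3]]
      rfl
    · have hci : ¬ (3:Int) ≤ (m:Int) := by exact_mod_cast hm3
      simp only [hdh, if_neg hci]
      rw [show pvDct s (m+1) = pvDct s m from by simp [pvDct, hm3]]
      rfl

lemma pvFoldB1 (s : Int) (m : Nat) :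
    (PySem.List.pyRange 0 (m:Int) 1).foldl
      (fun (st : Int × List Int) _ =>
        let s' := pvDeriveB st.1
        (s', st.2 ++ [PySem.Int.mod s' 10]))
      (s, [PySem.Int.mod s 10])
    = (pvSq s m, (List.range (m+1)).map (pvPr s)) := by
  induction m with
  | zero =>
    rw [show ((0:Nat):Int) = 0 from rfl, PySem.List.pyRange_one_eq_nil le_rfl]
    simp [pvSq, pvPr, List.range_one]
  | succ m ih =>
    rw [show ((m+1:Nat):Int) = (m:Int) + 1 from by push_cast; ring,
        PySem.List.pyRange_one_succ_right (Int.natCast_nonneg m), List.foldl_append, ih]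
    simp only [List.foldl_cons, List.foldl_nil]
    rw [List.range_succ (n := m+1), List.map_append]
    rfl

lemma pvFoldB2 (s : Int) (m : Nat) (k : Nat) (hk : k ≤ m) :
    (PySem.List.pyRange 3 (k:Int) 1).foldl
      (fun (d : PySem.Dict Int Int) (i : Int) =>
        if d.contains (PySem.Int.bor (PySem.Int.bor (PySem.Int.bor
          ((PySem.List.pyGetD ((List.range m).map (pvDl s)) (i-3) 0) <<< (24:Nat))
          ((PySem.List.pyGetD ((List.range m).map (pvDl s)) (i-2) 0) <<< (16:Nat)))
          ((PySem.List.pyGetD ((List.range m).map (pvDl s)) (i-1) 0) <<< (8:Nat)))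
          (PySem.List.pyGetD ((List.range m).map (pvDl s)) i 0)) then d
        else d.insert (PySem.Int.bor (PySem.Int.bor (PySem.Int.bor
          ((PySem.List.pyGetD ((List.range m).map (pvDl s)) (i-3) 0) <<< (24:Nat))
          ((PySem.List.pyGetD ((List.range m).map (pvDl s)) (i-2) 0) <<< (16:Nat)))
          ((PySem.List.pyGetD ((List.range m).map (pvDl s)) (i-1) 0) <<< (8:Nat)))
          (PySem.List.pyGetD ((List.range m).map (pvDl s)) i 0)) (PySem.List.pyGetD ((List.range (m+1)).map (pvPr s)) (i+1) 0))
      PySem.Dict.empty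
    = pvDct s k := by
  induction k with
  | zero =>
    rw [show ((0:Nat):Int) = 0 from rfl, PySem.List.pyRange_one_eq_nil (by norm_num)]
    rfl
  | succ k ih =>
    have hkm : k ≤ m := by omega
    by_cases hk3 : 3 ≤ k
    · rw [show ((k+1:Nat):Int) = (k:Int) + 1 from by push_cast; ring,
          PySem.List.pyRange_one_succ_right (by exact_mod_cast hk3), List.foldl_append, ih hkm]
      simp only [List.foldl_cons, List.foldl_nil]
      have hg : ∀ (j : Nat), j < m →
          PySem.List.pyGetD ((List.range m).map (pvDl s)) ((j:Int)) 0 = pvDl s j := by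
        intro j hj
        rw [PySem.List.pyGetD_natCast, PySem.List.getD_map_range _ _ _ _ hj]
      have e3 : ((k:Int) - 3) = ((k-3 : Nat) : Int) := by push_cast [Nat.cast_sub hk3]; ring
      have e2 : ((k:Int) - 2) = ((k-2 : Nat) : Int) := by push_cast [Nat.cast_sub (by omega : 2 ≤ k)]; ring
      have e1 : ((k:Int) - 1) = ((k-1 : Nat) : Int) := by push_cast [Nat.cast_sub (by omega : 1 ≤ k)]; ring
      rw [e3, e2, e1, hg _ (by omega), hg _ (by omega), hg _ (by omega), hg k (by omega)]
      have b0 := pvDl_bounds s (k-3)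
      have b1 := pvDl_bounds s (k-2)
      have b2 := pvDl_bounds s (k-1)
      have b3 := pvDl_bounds s k
      rw [pvKey _ _ _ _ b0.1 ⟨b1.1, b1.2⟩ ⟨b2.1, b2.2⟩ ⟨b3.1, b3.2⟩]
      rw [show ((k:Int) + 1) = ((k+1 : Nat) : Int) from by push_cast; ring,
          PySem.List.pyGetD_natCast, PySem.List.getD_map_range _ _ _ _ (by omega : k+1 < m+1)]
      rw [show pvDct s (k+1) = pvIns (pvDct s k) (pvPk s k) (pvPr s (k+1)) from by simp [pvDct, hk3]]
      rfl
    · have h1 : PySem.List.pyRange 3 ((k+1:Nat):Int) 1 = [] :=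
        PySem.List.pyRange_one_eq_nil (by exact_mod_cast by omega : ((k+1:Nat):Int) ≤ 3)
      have h2 : PySem.List.pyRange 3 ((k:Nat):Int) 1 = [] :=
        PySem.List.pyRange_one_eq_nil (by exact_mod_cast by omega : ((k:Nat):Int) ≤ 3)
      rw [h2] at ih
      rw [h1, show pvDct s (k+1) = pvDct s k from by simp [pvDct, hk3], ← ih hkm]

lemma pvRangeToNat (n : Int) : PySem.List.pyRange 0 n 1 = PySem.List.pyRange 0 (n.toNat : Int) 1 := by
  rcases (by omega : n ≤ 0 ∨ 0 < n) with h | h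
  · rw [PySem.List.pyRange_one_eq_nil h, PySem.List.pyRange_one_eq_nil (by omega)]
  · rw [Int.toNat_of_nonneg (le_of_lt h)]

-- ===== VERDICT (by name: the statement is the Claim_ definition above) =====
theorem derive_secret_at_spec : Claim_equal_derive_secret_at := by
  intro seed n _
  show derive_secret_at seed n = derive_secret_at_alt seed n
  unfold derive_secret_at derive_secret_at_alt
  rw [pvRangeToNat n]
  set m := n.toNat with hm
  rw [pvFoldA seed m, pvFoldB1 seed m]
  simp only [PySem.List.len_eq, List.length_map, List.length_range]
  rw [show ((m+1 : Nat):Int) - 1 = (m:Int) from by push_cast; ring]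
  have hds : (PySem.List.pyRange 0 (m:Int) 1).map
      (fun j => PySem.Int.mod
        (PySem.List.pyGetD ((List.range (m+1)).map (pvPr seed)) (j+1) 0 -
         PySem.List.pyGetD ((List.range (m+1)).map (pvPr seed)) j 0) 256)
      = (List.range m).map (pvDl seed) := by
    rw [PySem.List.pyRange_zero_nat m, List.map_map]
    apply List.map_congr_left
    intro j hj
    have hj' : j < m := List.mem_range.mp hj
    show PySem.Int.mod
        (PySem.List.pyGetD ((List.range (m+1)).map (pvPr seed)) ((j:Int)+1) 0 -
         PySem.List.pyGetD ((List.range (m+1)).map (pvPr seed)) (j:Int) 0) 256 = pvDl seed j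
    rw [show ((j:Int)+1) = ((j+1:Nat):Int) from by push_cast; ring,
        PySem.List.pyGetD_natCast, PySem.List.pyGetD_natCast,
        PySem.List.getD_map_range _ _ _ _ (by omega : j+1 < m+1),
        PySem.List.getD_map_range _ _ _ _ (by omega : j < m+1)]
    rfl
  rw [hds]
  rw [show ((PySem.List.pyRange 0 (m:Int) 1).length : Int) = (m:Int) from by
    rw [PySem.List.length_pyRange_one]; omega]
  rw [pvFoldB2 seed m m le_rfl]
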